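-- pv_equiv track=rewrite | github.com/AnshulParate2004/Genrative_AI | DeepConcepts/TypesofChunking/HierarchicalChunking.py | hierarchical_chunk
-- ===== SOURCE A (Python) =====
-- def hierarchical_chunk(text, section_keywords):
--     sections = []
--     current_section = []
--     for line in text.splitlines():
--         if any(keyword in line for keyword in section_keywords):
--             if current_section:
--                 sections.append("\n".join(current_section))
--             current_section = [line]
--         else:
--             current_section.append(line)
--     if current_section:
--         sections.append("\n".join(current_section))
--     return sections
-- ===== SOURCE B (Python) =====
-- def hierarchical_chunk(text, section_keywords):
--     lines = text.splitlines()
--     if not lines: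
--         return []
--     starts = [0] + [i for i in range(1, len(lines))
--                     if any(kw in lines[i] for kw in section_keywords)]
--     return ["\n".join(lines[s:e])
--             for s, e in zip(starts, starts[1:] + [len(lines)])]
-- ===== Notes on version B (the rewrite author's own statement) =====
-- stated objective: alternative
-- what changed: B replaces A's running accumulator with flush-on-keyword by a single scan that collects section-boundary indices (0 plus every later keyword line) and then emits each section by slicing the line list between consecutive boundaries.
import Mathlib
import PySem

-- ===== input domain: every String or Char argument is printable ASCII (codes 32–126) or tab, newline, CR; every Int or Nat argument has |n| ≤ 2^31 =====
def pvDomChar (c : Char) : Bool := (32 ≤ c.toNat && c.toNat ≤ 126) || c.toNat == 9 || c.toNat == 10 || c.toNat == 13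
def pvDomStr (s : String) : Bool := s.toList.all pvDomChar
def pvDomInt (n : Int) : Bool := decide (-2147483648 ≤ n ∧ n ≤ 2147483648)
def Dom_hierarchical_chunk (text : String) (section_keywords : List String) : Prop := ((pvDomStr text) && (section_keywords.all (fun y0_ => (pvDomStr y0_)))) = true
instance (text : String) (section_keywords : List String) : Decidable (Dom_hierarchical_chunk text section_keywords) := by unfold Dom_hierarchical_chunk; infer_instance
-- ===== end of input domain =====

-- B replaces A's running accumulator/flush loop by a boundary-index list plus slicing
-- (objective: alternative decomposition, same cost; return values proved equal on all inputs).

-- ===== PORT A =====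
-- the loop body: state = (sections, current_section)
def hcStep (section_keywords : List String) (st : List String × List String) (line : String) : List String × List String :=
  if section_keywords.any (fun keyword => PySem.Str.isIn keyword line) then
    (if st.2 ≠ [] then st.1 ++ [PySem.Str.join "\n" st.2] else st.1, [line])
  else
    (st.1, st.2 ++ [line])

def hierarchical_chunk (text : String) (section_keywords : List String) : List String :=
  let st := (PySem.Str.splitlines text).foldl (hcStep section_keywords) ([], [])
  if st.2 ≠ [] then st.1 ++ [PySem.Str.join "\n" st.2] else st.1

-- ===== PORT B =====
def hierarchical_chunk_alt (text : String) (section_keywords : List String) : List String :=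
  let lines := PySem.Str.splitlines text
  if lines = [] then []
  else
    let starts : List Int :=
      0 :: (PySem.List.pyRange 1 lines.length 1).filter
            (fun i => section_keywords.any (fun kw => PySem.Str.isIn kw (PySem.List.pyGetD lines i "")))
    (starts.zip (starts.tail ++ [(lines.length : Int)])).map
      (fun p => PySem.Str.join "\n" (PySem.List.slice lines (some p.1) (some p.2)))

-- ===== PRECONDITION & SPEC =====
def Spec_hierarchical_chunk (text : String) (section_keywords : List String) (out : List String) : Prop := out = hierarchical_chunk_alt text section_keywords
instance (text : String) (section_keywords : List String) (out : List String) : Decidable (Spec_hierarchical_chunk text section_keywords out) := by unfold Spec_hierarchical_chunk; infer_instance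

-- ===== CLAIM (what is proved, stated in full; the proofs are below) =====
def Claim_equal_hierarchical_chunk : Prop := ∀ (text : String) (section_keywords : List String), Dom_hierarchical_chunk text section_keywords → Spec_hierarchical_chunk text section_keywords (hierarchical_chunk text section_keywords)

-- ===== LEMMAS AND PROOFS =====

-- common reference shape: recursive splitting at keyword lines
def hcChunks (p : String → Bool) : List String → List String
  | [] => []
  | l :: ls =>
    PySem.Str.join "\n" (l :: ls.takeWhile (fun x => !p x)) ::
      hcChunks p (ls.dropWhile (fun x => !p x))
termination_by ls => ls.length
decreasing_by
  simpa using Nat.lt_succ_of_le (List.length_dropWhile_le _ _)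

-- Nat-index boundary list (proof-side counterpart of B's filtered range)
def hcStarts (p : String → Bool) (lines : List String) : List Nat :=
  (List.range lines.length).filter (fun i => decide (1 ≤ i) && p (lines.getD i ""))

def hcNatB (p : String → Bool) (lines : List String) : List String :=
  let starts := 0 :: hcStarts p lines
  (starts.zip (starts.tail ++ [lines.length])).map
    (fun q => PySem.Str.join "\n" ((lines.drop q.1).take (q.2 - q.1)))

-- ---- A side ----

theorem hcStep_loop (p : List String) (ls : List String) :
    ∀ (sections cur : List String), cur ≠ [] →
    (if (ls.foldl (hcStep p) (sections, cur)).2 ≠ [] then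
       (ls.foldl (hcStep p) (sections, cur)).1 ++ [PySem.Str.join "\n" (ls.foldl (hcStep p) (sections, cur)).2]
     else (ls.foldl (hcStep p) (sections, cur)).1)
    = sections ++ PySem.Str.join "\n" (cur ++ ls.takeWhile (fun x => !(p.any (fun kw => PySem.Str.isIn kw x))))
        :: hcChunks (fun x => p.any (fun kw => PySem.Str.isIn kw x)) (ls.dropWhile (fun x => !(p.any (fun kw => PySem.Str.isIn kw x)))) := by
  induction ls with
  | nil =>
    intro sections cur hc
    simp [hcChunks, hc]
  | cons x xs ih =>
    intro sections cur hc
    by_cases hx : p.any (fun kw => PySem.Str.isIn kw x) = true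
    · have hx' : (p.any fun kw => PySem.Str.isIn kw x) = true := hx
      simp only [List.foldl_cons, hcStep, hx, if_true, hc, ne_eq, not_false_iff]
      rw [ih (sections ++ [PySem.Str.join "\n" cur]) [x] (by simp)]
      simp only [List.takeWhile_cons, List.dropWhile_cons, hx, Bool.not_true, Bool.false_eq_true,
        if_false, hcChunks, List.append_assoc, List.cons_append,
        List.append_nil, List.nil_append]
    · have hx' : (p.any fun kw => PySem.Str.isIn kw x) = false := by simpa using hx
      simp only [List.foldl_cons, hcStep, hx', Bool.false_eq_true, if_false]
      rw [ih sections (cur ++ [x]) (by simp)]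
      simp only [List.takeWhile_cons, List.dropWhile_cons, hx', Bool.not_false, if_true,
        List.append_assoc, List.cons_append, List.nil_append]

theorem hcA_eq_chunks (text : String) (kws : List String) :
    hierarchical_chunk text kws
    = hcChunks (fun x => kws.any (fun kw => PySem.Str.isIn kw x)) (PySem.Str.splitlines text) := by
  unfold hierarchical_chunk
  cases h : PySem.Str.splitlines text with
  | nil => simp [hcChunks]
  | cons l ls =>
    have hstep : hcStep kws ([], []) l = ([], [l]) := by
      unfold hcStep; by_cases hx : kws.any (fun kw => PySem.Str.isIn kw l) = true <;> simp
    simp only [List.foldl_cons, hstep]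
    rw [hcStep_loop kws ls [] [l] (by simp)]
    simp [hcChunks]

-- ---- B side ----

theorem hcStarts_int (kws : List String) (lines : List String) :
    (PySem.List.pyRange 1 lines.length 1).filter
        (fun i => kws.any (fun kw => PySem.Str.isIn kw (PySem.List.pyGetD lines i "")))
    = List.map (fun (n : Nat) => (n : Int)) (hcStarts (fun x => kws.any (fun kw => PySem.Str.isIn kw x)) lines) := by
  cases lines with
  | nil => simp [hcStarts]
  | cons l ls =>
    rw [PySem.List.pyRange_one, List.filter_map, hcStarts]
    simp only [List.length_cons]
    have hlen : ((((ls.length + 1 : Nat)) : Int) - 1).toNat = ls.length := by push_cast; omega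
    rw [hlen, List.range_succ_eq_map, List.filter_cons]
    have h0 : (decide (1 ≤ (0:Nat)) && (kws.any (fun kw => PySem.Str.isIn kw ((l :: ls).getD 0 "")))) = false := by simp
    rw [h0]
    simp only [Bool.false_eq_true, if_false]
    have hc : ((fun i => kws.any fun kw => PySem.Str.isIn kw (PySem.List.pyGetD (l :: ls) i "")) ∘ fun (k : Nat) => (1:Int) + k)
        = ((fun i => decide (1 ≤ i) && kws.any fun kw => PySem.Str.isIn kw ((l :: ls).getD i "")) ∘ Nat.succ) := by
      funext k
      simp only [Function.comp_apply]
      have h1 : ((1:Int) + (k:Nat)) = (((k+1 : Nat)) : Int) := by push_cast; ring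
      rw [h1, PySem.List.pyGetD_natCast]
      simp
    rw [List.filter_map, hc, List.map_map]
    apply List.map_congr_left
    intro a _
    simp only [Function.comp_apply, Nat.succ_eq_add_one]
    push_cast; ring


theorem hcB_eq_natB (text : String) (kws : List String) :
    hierarchical_chunk_alt text kws
    = if PySem.Str.splitlines text = [] then []
      else hcNatB (fun x => kws.any (fun kw => PySem.Str.isIn kw x)) (PySem.Str.splitlines text) := by
  unfold hierarchical_chunk_alt hcNatB
  by_cases h : PySem.Str.splitlines text = []
  · simp [h]
  · simp only [h, if_false]
    rw [hcStarts_int]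
    set lines := PySem.Str.splitlines text with hl
    set S := hcStarts (fun x => kws.any (fun kw => PySem.Str.isIn kw x)) lines with hS
    have h1 : (0 : Int) :: List.map (fun n : Nat => (n:Int)) S = List.map (fun n : Nat => (n:Int)) (0 :: S) := rfl
    have h2 : (List.map (fun n : Nat => (n:Int)) S) ++ [(lines.length : Int)]
        = List.map (fun n : Nat => (n:Int)) (S ++ [lines.length]) := by simp
    rw [List.tail_cons, h2, h1, List.zip_map, List.map_map]
    apply List.map_congr_left
    intro q _
    simp only [Function.comp_apply, Prod.map_fst, Prod.map_snd, PySem.List.slice_natCast]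


theorem hcStarts_nil (p : String → Bool) (l : String) (pre : List String)
    (h : ∀ x ∈ pre, p x = false) : hcStarts p (l :: pre) = [] := by
  unfold hcStarts
  rw [List.filter_eq_nil_iff]
  intro i hi
  match i with
  | 0 => simp
  | Nat.succ k =>
    have hk : k < pre.length := by
      have := List.mem_range.mp hi; simpa using this
    simp only [List.getD_cons_succ, Bool.and_eq_true, decide_eq_true_eq, not_and]
    intro _
    rw [List.getD_eq_getElem pre "" hk, h _ (List.getElem_mem hk)]
    simp


theorem hcStarts_split (p : String → Bool) (l x : String) (pre rest : List String)
    (hpre : ∀ y ∈ pre, p y = false) (hx : p x = true) :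
    hcStarts p (l :: pre ++ x :: rest)
    = (pre.length + 1) :: (hcStarts p (x :: rest)).map (· + (pre.length + 1)) := by
  have hlen : (l :: pre ++ x :: rest).length = (pre.length + 1) + (rest.length + 1) := by
    simp; omega
  unfold hcStarts
  rw [hlen, List.range_add, List.filter_append]
  have h1 : (List.range (pre.length + 1)).filter
      (fun i => decide (1 ≤ i) && p ((l :: pre ++ x :: rest).getD i "")) = [] := by
    rw [List.filter_eq_nil_iff]
    intro i hi
    have hi' : i < pre.length + 1 := List.mem_range.mp hi
    match i with
    | 0 => simp
    | Nat.succ k =>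
      have hk : k < pre.length := by omega
      simp only [Bool.and_eq_true, decide_eq_true_eq, not_and]
      intro _
      have : (l :: pre ++ x :: rest).getD (k+1) "" = pre.getD k "" := by
        rw [List.cons_append, List.getD_cons_succ]
        rw [List.getD_append _ _ _ _ hk]
      rw [this, List.getD_eq_getElem pre "" hk, hpre _ (List.getElem_mem hk)]
      simp
  rw [h1, List.nil_append, List.filter_map]
  have h2 : ∀ j : Nat, ((fun i => decide (1 ≤ i) && p ((l :: pre ++ x :: rest).getD i "")) ∘
      (fun i => (pre.length + 1) + i)) j = p ((x :: rest).getD j "") := by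
    intro j
    simp only [Function.comp_apply]
    have hd : (l :: pre ++ x :: rest).getD ((pre.length + 1) + j) "" = (x :: rest).getD j "" := by
      rw [show (l :: pre ++ x :: rest) = (l :: pre) ++ (x :: rest) from rfl,
        List.getD_append_right _ _ _ _ (by simp)]
      simp
    rw [hd]
    have hge : decide (1 ≤ pre.length + 1 + j) = true := by simp; omega
    rw [hge, Bool.true_and]
  rw [List.filter_congr (fun j _ => h2 j)]
  -- now: (range (rest.length+1)).filter (fun j => p ((x::rest).getD j "")) = 0 :: hcStarts p (x::rest)
  have h3 : (List.range (rest.length + 1)).filter (fun j => p ((x :: rest).getD j ""))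
      = 0 :: hcStarts p (x :: rest) := by
    rw [List.range_succ_eq_map, List.filter_cons]
    simp only [List.getD_cons_zero, hx, if_true]
    congr 1
    unfold hcStarts
    simp only [List.length_cons, List.range_succ_eq_map, List.filter_cons]
    simp only [show (decide (1 ≤ (0:Nat)) && p ((x :: rest).getD 0 "")) = false by simp,
      Bool.false_eq_true, if_false]
    rw [List.filter_map, List.filter_map]
    apply congrArg
    apply List.filter_congr
    intro k _
    simp
  rw [h3, List.map_cons]
  simp only [Nat.add_zero]
  have h4 : List.map (fun k => pre.length + 1 + k) (hcStarts p (x :: rest))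
      = List.map (fun k => k + (pre.length + 1)) (hcStarts p (x :: rest)) :=
    List.map_congr_left (fun a _ => by omega)
  rw [h4]
  rfl


theorem hcNatB_aux (n : Nat) : ∀ (p : String → Bool) (lines : List String),
    lines.length ≤ n → lines ≠ [] → hcNatB p lines = hcChunks p lines := by
  induction n with
  | zero =>
    intro p lines hle hne
    cases lines with
    | nil => exact absurd rfl hne
    | cons a as => simp at hle
  | succ n ih =>
    intro p lines hle hne
    obtain ⟨l, ls, rfl⟩ := List.exists_cons_of_ne_nil hne
    by_cases hpost : ls.dropWhile (fun x => !p x) = []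
    · have hpre : ∀ y ∈ ls, p y = false := by
        intro y hy
        have hls : ls.takeWhile (fun x => !p x) = ls := by
          conv_rhs => rw [← List.takeWhile_append_dropWhile (p := fun x => !p x) (l := ls)]
          rw [hpost, List.append_nil]
        rw [← hls] at hy
        simpa using List.mem_takeWhile_imp hy
      have hls : ls.takeWhile (fun x => !p x) = ls := by
        conv_rhs => rw [← List.takeWhile_append_dropWhile (p := fun x => !p x) (l := ls)]
        rw [hpost, List.append_nil]
      rw [hcChunks, hpost, hls]
      unfold hcNatB
      rw [hcStarts_nil p l ls hpre]
      simp [hcChunks]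
    · obtain ⟨x, rest, hxr⟩ := List.exists_cons_of_ne_nil hpost
      have hx : p x = true := by
        have hh := List.head_dropWhile_not (fun x => !p x) (l := ls) hpost
        simp only [hxr, List.head_cons] at hh
        simpa using hh
      have hpre : ∀ y ∈ ls.takeWhile (fun x => !p x), p y = false :=
        fun y hy => by simpa using List.mem_takeWhile_imp hy
      have hls : ls = ls.takeWhile (fun x => !p x) ++ x :: rest := by
        conv_lhs => rw [← List.takeWhile_append_dropWhile (p := fun x => !p x) (l := ls)]
        rw [hxr]
      set pre := ls.takeWhile (fun x => !p x) with hpredef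
      set d := pre.length + 1 with hd
      set S := hcStarts p (x :: rest) with hS
      rw [hcChunks, hxr]
      have hlines : l :: ls = l :: pre ++ x :: rest := by rw [hls]; simp
      rw [hlines]
      unfold hcNatB
      rw [hcStarts_split p l x pre rest hpre hx]
      have hlen2 : (l :: pre ++ x :: rest).length = (rest.length + 1) + d := by
        simp [hd]; omega
      rw [hlen2]
      set m := rest.length + 1 with hm
      -- massage the zip into a shifted copy of the (x :: rest) zip
      have hcons : (d :: S.map (· + d)) = List.map (· + d) (0 :: S) := by simp
      have happ : S.map (· + d) ++ [m + d] = List.map (· + d) (S ++ [m]) := by simp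
      simp only [List.tail_cons, List.zip_cons_cons, List.map_cons, List.cons_append]
      rw [hcons, happ, List.zip_map, List.map_map]
      congr 1
      · -- first section: lines[0:d] = l :: pre
        have h5 : List.take (pre.length + 1 - 0) (List.drop 0 (l :: (pre ++ x :: rest))) = l :: pre := by
          rw [List.drop_zero, Nat.sub_zero, show l :: (pre ++ x :: rest) = (l :: pre) ++ (x :: rest) by simp,
            show pre.length + 1 = (l :: pre).length by simp, List.take_left]
        rw [h5, ← hpredef]
      · -- remaining sections are those of (x :: rest), shifted
        have hrec : hcNatB p (x :: rest) = hcChunks p (x :: rest) := by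
          apply ih p (x :: rest) _ (by simp)
          have : ls.length ≤ n := by simpa using hle
          have : (x :: rest).length ≤ ls.length := by
            rw [hls]; simp
          omega
        rw [← hrec]
        unfold hcNatB
        simp only [List.length_cons, ← hm]
        apply List.map_congr_left
        intro q _
        simp only [Function.comp_apply, Prod.map_fst, Prod.map_snd]
        have e1 : q.2 + d - (q.1 + d) = q.2 - q.1 := by omega
        have e2 : List.drop (q.1 + d) (l :: (pre ++ x :: rest)) = List.drop q.1 (x :: rest) := by
          rw [show l :: (pre ++ x :: rest) = (l :: pre) ++ (x :: rest) by simp,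
            show q.1 + d = (l :: pre).length + q.1 by simp [hd]; omega, List.drop_append]
          simp
        rw [e1, e2]

theorem hcNatB_eq_chunks (p : String → Bool) (lines : List String) (h : lines ≠ []) :
    hcNatB p lines = hcChunks p lines :=
  hcNatB_aux lines.length p lines le_rfl h

-- ===== VERDICT (by name: the statement is the Claim_ definition above) =====
theorem hierarchical_chunk_spec : Claim_equal_hierarchical_chunk := by
  intro text kws _
  unfold Spec_hierarchical_chunk
  rw [hcA_eq_chunks, hcB_eq_natB]
  by_cases h : PySem.Str.splitlines text = []
  · simp [h, hcChunks]
  · simp [h, hcNatB_eq_chunks _ _ h]
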